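-- pv_equiv track=rewrite | github.com/EudaldSans/advent_of_code | 2023/day_09/puzzles.py | extrapolate_values
-- ===== SOURCE A (Python) =====
-- from typing import List, Tuple
--
-- def extrapolate_values(value_sequence: List[Tuple[int, int]]) -> Tuple[int, int]:
--     value_sequence = value_sequence[::-1]
--
--     future_value = 0
--     past_value = 0
--     for first_value, last_value in value_sequence:
--         future_value += last_value
--         past_value = first_value - past_value
--
--     return past_value, future_value
-- ===== SOURCE B (Python) =====
-- from typing import List, Tuple
--
-- def extrapolate_values(value_sequence: List[Tuple[int, int]]) -> Tuple[int, int]: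
--     future_value = sum(last for _, last in value_sequence)
--     past_value = sum(first if j % 2 == 0 else -first
--                      for j, (first, _) in enumerate(value_sequence))
--     return past_value, future_value
-- ===== Notes on version B (the rewrite author's own statement) =====
-- stated objective: simpler
-- what changed: Replaced the reversed-list stateful loop by two direct sums over the original order: future is the plain sum of last components, past is the alternating sum of first components with sign (-1)**index.
import Mathlib
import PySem

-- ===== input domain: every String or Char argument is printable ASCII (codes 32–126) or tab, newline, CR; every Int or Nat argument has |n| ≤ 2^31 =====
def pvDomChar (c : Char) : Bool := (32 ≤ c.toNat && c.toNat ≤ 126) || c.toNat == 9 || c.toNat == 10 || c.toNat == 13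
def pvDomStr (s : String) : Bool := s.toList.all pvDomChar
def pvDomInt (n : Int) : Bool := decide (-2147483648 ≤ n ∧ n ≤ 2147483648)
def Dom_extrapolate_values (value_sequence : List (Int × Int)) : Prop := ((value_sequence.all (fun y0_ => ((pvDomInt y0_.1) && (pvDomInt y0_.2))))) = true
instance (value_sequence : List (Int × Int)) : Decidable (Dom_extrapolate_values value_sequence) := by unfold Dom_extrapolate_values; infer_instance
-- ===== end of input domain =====

-- B replaces A's reversed-list stateful loop by two direct sums over the original order (objective: simpler).


-- ===== PORT A =====
-- value_sequence[::-1] is the full reversed slice: exactly List.reverse.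
def extrapolate_values (value_sequence : List (Int × Int)) : Int × Int :=
  let vs := value_sequence.reverse
  -- state (future_value, past_value), loop body: future += last; past = first - past
  let st := vs.foldl (fun (acc : Int × Int) fl => (acc.1 + fl.2, fl.1 - acc.2)) (0, 0)
  (st.2, st.1)

-- ===== PORT B =====
def extrapolate_values_alt (value_sequence : List (Int × Int)) : Int × Int :=
  let future_value := (value_sequence.map (fun fl => fl.2)).sum
  let past_value := ((PySem.List.enumerate value_sequence 0).map
      (fun jp => if jp.1 % 2 == 0 then jp.2.1 else -jp.2.1)).sum
  (past_value, future_value)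

-- ===== PRECONDITION & SPEC =====
def Spec_extrapolate_values (value_sequence : List (Int × Int)) (out : Int × Int) : Prop := out = extrapolate_values_alt value_sequence
instance (value_sequence : List (Int × Int)) (out : Int × Int) : Decidable (Spec_extrapolate_values value_sequence out) := by unfold Spec_extrapolate_values; infer_instance

-- ===== CLAIM (what is proved, stated in full; the proofs are below) =====
def Claim_equal_extrapolate_values : Prop := ∀ (value_sequence : List (Int × Int)), Dom_extrapolate_values value_sequence → Spec_extrapolate_values value_sequence (extrapolate_values value_sequence)

-- ===== LEMMAS AND PROOFS =====

-- B's past-value sum, with the enumerate start index generalized: starting at s+1 negates it.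
theorem alt_sum_shift (xs : List (Int × Int)) (s : Int) :
    ((PySem.List.enumerate xs (s + 1)).map
      (fun jp => if jp.1 % 2 == 0 then jp.2.1 else -jp.2.1)).sum
    = -((PySem.List.enumerate xs s).map
      (fun jp => if jp.1 % 2 == 0 then jp.2.1 else -jp.2.1)).sum := by
  induction xs generalizing s with
  | nil => simp [PySem.List.enumerate_nil]
  | cons x xs ih =>
    simp only [PySem.List.enumerate_cons, List.map_cons, List.sum_cons, ih (s + 1)]
    have hpar : ((s + 1) % 2 == 0) = !(s % 2 == 0) := by
      rcases Int.emod_two_eq_zero_or_one s with h | h <;>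
        simp [Int.add_emod, h]
    rw [hpar]
    by_cases h : (s % 2 == 0) = true <;> simp [h] <;> ring

-- A's reversed fold computes (sum of lasts, alternating sum of firsts).
theorem fold_eq (xs : List (Int × Int)) :
    xs.reverse.foldl (fun (acc : Int × Int) fl => (acc.1 + fl.2, fl.1 - acc.2)) (0, 0)
    = ((xs.map (fun fl => fl.2)).sum,
       ((PySem.List.enumerate xs 0).map
         (fun jp => if jp.1 % 2 == 0 then jp.2.1 else -jp.2.1)).sum) := by
  rw [List.foldl_reverse]
  induction xs with
  | nil => simp [PySem.List.enumerate_nil]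
  | cons x xs ih =>
    simp only [List.foldr_cons, ih, PySem.List.enumerate_cons, List.map_cons, List.sum_cons]
    have := alt_sum_shift xs 0
    norm_num at this ⊢
    rw [this]
    constructor
    · ring
    · ring

-- ===== VERDICT (by name: the statement is the Claim_ definition above) =====
theorem extrapolate_values_spec : Claim_equal_extrapolate_values := by
  intro vs _
  show extrapolate_values vs = extrapolate_values_alt vs
  simp only [extrapolate_values, extrapolate_values_alt, fold_eq]
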